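-- pv_equiv track=rewrite | github.com/aidaco/tutoring | nov-11-20/main.py | iter_dice
-- ===== SOURCE A (Python) =====
-- def iter_dice(dice: str):
--     op = "+"
--     elem = ""
--     for ch in dice:
--         if ch not in ("+", "-"):
--             elem += ch
--         else:
--             yield op, elem
--             op, elem = ch, ""
--     yield op, elem
-- ===== SOURCE B (Python) =====
-- def iter_dice(dice: str):
--     # Right-to-left scan: build the (op, elem) pairs back-to-front, then reverse once.
--     out = []
--     buf = []  # chars of the current element, collected right-to-left
--     for ch in reversed(dice):
--         if ch in "+-":
--             out.append((ch, "".join(reversed(buf))))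
--             buf = []
--         else:
--             buf.append(ch)
--     out.append(("+", "".join(reversed(buf))))
--     yield from reversed(out)
-- ===== Notes on version B (the rewrite author's own statement) =====
-- stated objective: alternative
-- what changed: B scans the string right-to-left, building the (op, elem) pair list back-to-front with one final reverse, instead of A's left-to-right accumulate-and-yield loop.
import Mathlib
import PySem

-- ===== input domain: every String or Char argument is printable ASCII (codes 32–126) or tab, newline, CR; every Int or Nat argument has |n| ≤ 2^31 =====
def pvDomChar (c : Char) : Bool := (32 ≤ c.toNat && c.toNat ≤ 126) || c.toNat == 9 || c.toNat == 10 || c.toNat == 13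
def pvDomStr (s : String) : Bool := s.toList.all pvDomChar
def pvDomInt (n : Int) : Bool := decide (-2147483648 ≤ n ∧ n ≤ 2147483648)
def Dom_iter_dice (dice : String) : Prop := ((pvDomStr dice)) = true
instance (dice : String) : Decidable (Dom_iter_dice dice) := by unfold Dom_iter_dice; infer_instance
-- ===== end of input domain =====

-- B scans the string right-to-left, building the pair list back-to-front with one
-- final reverse, instead of A's left-to-right accumulate-and-yield loop (alternative).
-- Both generators are modelled as the list of yielded pairs.

-- ===== PORT A =====
-- the generator's for-loop, carrying (op, elem); yields are collected in order
def iterDiceLoop (op : String) (elem : String) : List Char → List (String × String)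
  | [] => [(op, elem)]
  | ch :: rest =>
    if ch ≠ '+' ∧ ch ≠ '-' then iterDiceLoop op (elem.push ch) rest
    else (op, elem) :: iterDiceLoop (String.singleton ch) "" rest

def iter_dice (dice : String) : List (String × String) :=
  iterDiceLoop "+" "" dice.toList

-- ===== PORT B =====
-- Source B's loop over reversed(dice), state (out, buf); out.append = ++ [·];
-- ''.join(reversed(buf)) over a char list is String.ofList buf.reverse (exact); final reverse
def iter_dice_alt (dice : String) : List (String × String) :=
  let st := dice.toList.reverse.foldl
    (fun (st : List (String × String) × List Char) ch =>
      if ch = '+' ∨ ch = '-' then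
        (st.1 ++ [(String.singleton ch, String.ofList st.2.reverse)], [])
      else (st.1, st.2 ++ [ch])) ([], [])
  (st.1 ++ [("+", String.ofList st.2.reverse)]).reverse

-- ===== PRECONDITION & SPEC =====
def Spec_iter_dice (dice : String) (out : List (String × String)) : Prop := out = iter_dice_alt dice
instance (dice : String) (out : List (String × String)) : Decidable (Spec_iter_dice dice out) := by unfold Spec_iter_dice; infer_instance

-- ===== CLAIM (what is proved, stated in full; the proofs are below) =====
def Claim_equal_iter_dice : Prop := ∀ (dice : String), Dom_iter_dice dice → Spec_iter_dice dice (iter_dice dice)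

-- ===== LEMMAS AND PROOFS =====

-- B's loop body, as a step function (B's foldl-over-reverse is a foldr over the chars)
def iterDiceStep (ch : Char) (st : List (String × String) × List Char) :
    List (String × String) × List Char :=
  if ch = '+' ∨ ch = '-' then
    (st.1 ++ [(String.singleton ch, String.ofList st.2.reverse)], [])
  else (st.1, st.2 ++ [ch])

theorem singleton_append_ofList (ch : Char) (rs : List Char) :
    String.singleton ch ++ String.ofList rs = String.ofList (ch :: rs) := by
  apply String.ext
  simp [String.singleton]

theorem push_append_ofList (e : String) (ch : Char) (rs : List Char) :
    e.push ch ++ String.ofList rs = e ++ String.ofList (ch :: rs) := by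
  rw [String.push_eq_append, String.append_assoc, singleton_append_ofList]

-- A's loop equals B's foldr state, read out back-to-front
theorem iterDiceLoop_eq_foldr (l : List Char) (op e : String) :
    iterDiceLoop op e l =
      (op, e ++ String.ofList (l.foldr iterDiceStep ([], [])).2.reverse) ::
        (l.foldr iterDiceStep ([], [])).1.reverse := by
  induction l generalizing op e with
  | nil => simp [iterDiceLoop]
  | cons ch rest ih =>
    by_cases h : ch = '+' ∨ ch = '-'
    · have hne : ¬ (ch ≠ '+' ∧ ch ≠ '-') := by tauto
      simp [iterDiceLoop, hne, List.foldr_cons, iterDiceStep, h, ih]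
    · have hne : ch ≠ '+' ∧ ch ≠ '-' := by tauto
      simp only [iterDiceLoop, if_pos hne, List.foldr_cons, iterDiceStep, if_neg h, ih,
        List.reverse_append, List.reverse_cons, List.reverse_nil, List.nil_append,
        List.singleton_append, push_append_ofList]

theorem iter_dice_alt_eq (dice : String) :
    iter_dice_alt dice =
      ("+", String.ofList (dice.toList.foldr iterDiceStep ([], [])).2.reverse) ::
        (dice.toList.foldr iterDiceStep ([], [])).1.reverse := by
  unfold iter_dice_alt
  rw [List.foldl_reverse]
  change ((List.foldr iterDiceStep ([], []) dice.toList).1 ++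
      [("+", String.ofList (List.foldr iterDiceStep ([], []) dice.toList).2.reverse)]).reverse = _
  simp

-- ===== VERDICT (by name: the statement is the Claim_ definition above) =====
theorem iter_dice_spec : Claim_equal_iter_dice := by
  intro dice _
  unfold Spec_iter_dice iter_dice
  rw [iterDiceLoop_eq_foldr, iter_dice_alt_eq]
  simp
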